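-- pv_equiv track=rewrite | github.com/ricktjwong/micromagnetic-simulations | optimisation/generate_boilerplate.py | generate_gridspace
-- ===== SOURCE A (Python) =====
-- def generate_gridspace(x: int, y: int) -> str:
--     gridspace = []
--     for i in range(int(x/2)):
--         for j in range(int(y/2)):
--             gridspace += [', Cuboid(GridSize, GridSize, GridSize)' +
--                           '.transl(' + 'Translate*' + str(1 + 2*i) +
--                           ', Translate*' + str(1 + 2*j) + ', 0))\n']
--     gridspace += list(map(lambda x:
--                       x.replace('Translate', '-Translate', 1), gridspace))
--     gridspace += list(map(lambda x:
--                       '-Translate'.join(x.rsplit('Translate', 1)), gridspace))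
--     gridspace = ['DefRegion(' + str(i+1) + x for i, x in enumerate(gridspace)]
--     lines = ''.join(gridspace)
--     return lines
-- ===== SOURCE B (Python) =====
-- def generate_gridspace(x: int, y: int) -> str:
--     nx, ny = int(x / 2), int(y / 2)
--     out = []
--     counter = 1
--     for xs, ys in (('', ''), ('-', ''), ('', '-'), ('-', '-')):
--         for i in range(nx):
--             for j in range(ny):
--                 out.append('DefRegion(' + str(counter) +
--                            ', Cuboid(GridSize, GridSize, GridSize).transl(' +
--                            xs + 'Translate*' + str(1 + 2 * i) +
--                            ', ' + ys + 'Translate*' + str(1 + 2 * j) + ', 0))\n')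
--                 counter += 1
--     return ''.join(out)
-- ===== Notes on version B (the rewrite author's own statement) =====
-- stated objective: simpler
-- what changed: A builds the positive-quadrant lines, doubles the list twice via string replace/rsplit to negate the x- and y-signs, then renumbers with enumerate; B emits every final line directly in a single pass over the four sign pairs with a running counter, never rewriting a string after it is built.
import Mathlib
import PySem

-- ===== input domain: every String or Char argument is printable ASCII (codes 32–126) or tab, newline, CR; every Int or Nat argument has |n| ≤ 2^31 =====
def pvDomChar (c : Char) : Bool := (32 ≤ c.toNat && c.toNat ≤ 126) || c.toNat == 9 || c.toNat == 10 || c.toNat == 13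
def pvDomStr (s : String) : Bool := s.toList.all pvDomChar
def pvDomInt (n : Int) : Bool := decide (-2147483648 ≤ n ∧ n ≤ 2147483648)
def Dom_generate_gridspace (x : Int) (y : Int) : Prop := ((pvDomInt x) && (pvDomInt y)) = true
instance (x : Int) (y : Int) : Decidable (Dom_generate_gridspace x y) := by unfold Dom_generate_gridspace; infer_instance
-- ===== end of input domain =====

-- B replaces A's list-doubling via string replace/rsplit with one pass over the four sign
-- pairs that emits each final line directly with a running counter (objective: simpler).

-- ===== PORT A =====
-- hand port of s.replace(old, new, 1): left-to-right scan replacing the first occurrence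
-- (exact for Python's replace with count = 1, including old = '')
def pvReplace1 (old new : List Char) : List Char → List Char
  | [] => if old.isPrefixOf ([] : List Char) then new else []
  | c :: cs =>
    if old.isPrefixOf (c :: cs) then new ++ (c :: cs).drop old.length
    else c :: pvReplace1 old new cs

-- hand port of s.rsplit(sep, 1): split at the LAST occurrence of sep
-- (exact for nonempty sep, the only way A calls it; Python raises on sep = '')
def pvSplitLast (sep : List Char) : List Char → Option (List Char × List Char)
  | [] => none
  | c :: cs =>
    match pvSplitLast sep cs with
    | some (p, s) => some (c :: p, s)
    | none => if sep.isPrefixOf (c :: cs) then some ([], (c :: cs).drop sep.length) else none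

def pvRsplit1 (s sep : List Char) : List (List Char) :=
  match pvSplitLast sep s with
  | none => [s]
  | some (p, q) => [p, q]

-- the string A's inner loop appends (its exact concatenation pieces)
def pvItemA (i j : Int) : List Char :=
  ", Cuboid(GridSize, GridSize, GridSize)".toList ++ ".transl(".toList ++ "Translate*".toList
    ++ PySem.Int.toChars (1 + 2 * i) ++ ", Translate*".toList ++ PySem.Int.toChars (1 + 2 * j)
    ++ ", 0))\n".toList

-- int(x/2) is PySem.Int.truncdiv x 2 (exact for |x| < 2^53, which Dom guarantees)
def generate_gridspace (x : Int) (y : Int) : String :=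
  let g1 : List (List Char) :=
    (PySem.List.pyRange 0 (PySem.Int.truncdiv x 2) 1).foldl (fun acc i =>
      (PySem.List.pyRange 0 (PySem.Int.truncdiv y 2) 1).foldl (fun acc2 j =>
        acc2 ++ [pvItemA i j]) acc) []
  let g2 := g1 ++ g1.map (fun s => pvReplace1 "Translate".toList "-Translate".toList s)
  let g3 := g2 ++ g2.map (fun s => PySem.Chars.join "-Translate".toList (pvRsplit1 s "Translate".toList))
  let g4 := (PySem.List.enumerate g3 0).map (fun p => "DefRegion(".toList ++ PySem.Int.toChars (p.1 + 1) ++ p.2)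
  String.ofList (PySem.Chars.join [] g4)

-- ===== PORT B =====
-- the line B emits for counter c, sign pair (xs, ys) and indices (i, j) (Source B's exact pieces)
def pvItemB (c : Int) (xs ys : List Char) (i j : Int) : List Char :=
  "DefRegion(".toList ++ PySem.Int.toChars c
    ++ ", Cuboid(GridSize, GridSize, GridSize).transl(".toList
    ++ xs ++ "Translate*".toList ++ PySem.Int.toChars (1 + 2 * i)
    ++ ", ".toList ++ ys ++ "Translate*".toList ++ PySem.Int.toChars (1 + 2 * j)
    ++ ", 0))\n".toList

def generate_gridspace_alt (x : Int) (y : Int) : String :=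
  let nx := PySem.Int.truncdiv x 2
  let ny := PySem.Int.truncdiv y 2
  let st := [(([] : List Char), ([] : List Char)), ("-".toList, []), ([], "-".toList),
             ("-".toList, "-".toList)].foldl
    (fun st p =>
      (PySem.List.pyRange 0 nx 1).foldl (fun st1 i =>
        (PySem.List.pyRange 0 ny 1).foldl (fun st2 j =>
          (st2.1 ++ [pvItemB st2.2 p.1 p.2 i j], st2.2 + 1)) st1) st)
    (([] : List (List Char)), (1 : Int))
  String.ofList (PySem.Chars.join [] st.1)

-- ===== PRECONDITION & SPEC =====
def Spec_generate_gridspace (x : Int) (y : Int) (out : String) : Prop := out = generate_gridspace_alt x y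
instance (x : Int) (y : Int) (out : String) : Decidable (Spec_generate_gridspace x y out) := by unfold Spec_generate_gridspace; infer_instance

-- ===== CLAIM (what is proved, stated in full; the proofs are below) =====
def Claim_equal_generate_gridspace : Prop := ∀ (x : Int) (y : Int), Dom_generate_gridspace x y → Spec_generate_gridspace x y (generate_gridspace x y)

-- ===== LEMMAS AND PROOFS =====

-- the common "tail of a line" for sign prefixes xs, ys
def pvTail (xs ys : List Char) (i j : Int) : List Char :=
  ", Cuboid(GridSize, GridSize, GridSize).transl(".toList
    ++ xs ++ "Translate*".toList ++ PySem.Int.toChars (1 + 2 * i)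
    ++ ", ".toList ++ ys ++ "Translate*".toList ++ PySem.Int.toChars (1 + 2 * j)
    ++ ", 0))\n".toList

def pvBlock (xs ys : List Char) (nx ny : Int) : List (List Char) :=
  (PySem.List.pyRange 0 nx 1).flatMap (fun i =>
    (PySem.List.pyRange 0 ny 1).map (fun j => pvTail xs ys i j))

def pvNumber (c : Int) : List (List Char) → List (List Char)
  | [] => []
  | s :: rest => ("DefRegion(".toList ++ PySem.Int.toChars c ++ s) :: pvNumber (c + 1) rest

-- str(n) never contains the letter 'T'
theorem pv_toDigitsCore_mem (fuel n : Nat) (acc : List Char) (c : Char)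
    (h : c ∈ Nat.toDigitsCore 10 fuel n acc) : c ∈ acc ∨ ∃ d, d < 10 ∧ c = Nat.digitChar d := by
  induction fuel generalizing n acc with
  | zero => simp [Nat.toDigitsCore] at h; exact Or.inl h
  | succ f ih =>
    rw [Nat.toDigitsCore] at h
    by_cases h2 : n / 10 = 0
    · simp [h2] at h
      rcases h with h | h
      · exact Or.inr ⟨n % 10, Nat.mod_lt _ (by norm_num), h⟩
      · exact Or.inl h
    · simp [h2] at h
      rcases ih _ _ h with h3 | h3
      · rcases List.mem_cons.mp h3 with h4 | h4
        · exact Or.inr ⟨n % 10, Nat.mod_lt _ (by norm_num), h4⟩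
        · exact Or.inl h4
      · exact Or.inr h3

theorem pv_toChars_no_T (n : Int) : 'T' ∉ PySem.Int.toChars n := by
  intro h
  have hd : ∀ m : Nat, 'T' ∈ Nat.toDigits 10 m → False := by
    intro m hm
    rcases pv_toDigitsCore_mem _ _ _ _ hm with h1 | ⟨d, hd10, he⟩
    · simp at h1
    · interval_cases d <;> exact absurd he (by decide)
  unfold PySem.Int.toChars at h
  split at h
  · rcases List.mem_cons.mp h with h1 | h1
    · exact absurd h1.symm (by decide)
    · exact hd _ h1
  · exact hd _ h

-- prefix tests used by pvReplace1 / pvSplitLast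
theorem pv_isPrefixOf_self_append (l t : List Char) : l.isPrefixOf (l ++ t) = true := by simp

theorem pv_isPrefixOf_cons_ne (c : Char) (R l : List Char) (h : c ≠ 'T') :
    ('T' :: R).isPrefixOf (c :: l) = false := by
  simp [List.isPrefixOf]
  intro h2; exact absurd h2.symm h

-- pvReplace1 replaces the first occurrence
theorem pvReplace1_eq (R new pre suf : List Char) (h : 'T' ∉ pre) :
    pvReplace1 ('T' :: R) new (pre ++ ('T' :: R) ++ suf) = pre ++ new ++ suf := by
  induction pre with
  | nil =>
    show pvReplace1 ('T' :: R) new ('T' :: (R ++ suf)) = [] ++ new ++ suf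
    rw [pvReplace1]
    have h1 : ('T' :: R).isPrefixOf ('T' :: (R ++ suf)) = true := by
      simp [← pv_isPrefixOf_self_append ('T' :: R) suf]
    rw [h1]
    simp
  | cons c pre ih =>
    have hc : c ≠ 'T' := fun he => h (by simp [he])
    have hpre : 'T' ∉ pre := fun hm => h (by simp [hm])
    have ih' : pvReplace1 ('T' :: R) new (pre ++ 'T' :: (R ++ suf)) = pre ++ new ++ suf := by
      rw [← ih hpre]; congr 1; simp
    show pvReplace1 ('T' :: R) new (c :: (pre ++ ('T' :: R) ++ suf)) = c :: (pre ++ new ++ suf)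
    rw [pvReplace1, pv_isPrefixOf_cons_ne c R _ hc]
    simp [ih']

-- pvSplitLast finds the last occurrence
theorem pvSplitLast_none (R l : List Char) (h : 'T' ∉ l) :
    pvSplitLast ('T' :: R) l = none := by
  induction l with
  | nil => rfl
  | cons c cs ih =>
    have hc : c ≠ 'T' := fun he => h (by simp [he])
    have hcs : 'T' ∉ cs := fun hm => h (by simp [hm])
    rw [pvSplitLast, ih hcs, pv_isPrefixOf_cons_ne c R cs hc]
    rfl

theorem pvSplitLast_eq (R pre suf : List Char) (hR : 'T' ∉ R) (hs : 'T' ∉ suf) :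
    pvSplitLast ('T' :: R) (pre ++ ('T' :: R) ++ suf) = some (pre, suf) := by
  induction pre with
  | nil =>
    show pvSplitLast ('T' :: R) ('T' :: (R ++ suf)) = some ([], suf)
    rw [pvSplitLast]
    have h1 : pvSplitLast ('T' :: R) (R ++ suf) = none :=
      pvSplitLast_none R _ (by simp_all)
    rw [h1]
    have h2 : ('T' :: R).isPrefixOf ('T' :: (R ++ suf)) = true := by
      simp [← pv_isPrefixOf_self_append ('T' :: R) suf]
    rw [h2]
    simp
  | cons c pre ih =>
    show pvSplitLast ('T' :: R) (c :: (pre ++ ('T' :: R) ++ suf)) = some (c :: pre, suf)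
    rw [pvSplitLast, ih]

-- pointwise facts about the line strings
theorem pvItemA_eq (i j : Int) : pvItemA i j = pvTail [] [] i j := by
  have h1 : ", Cuboid(GridSize, GridSize, GridSize)".toList ++ ".transl(".toList
      = ", Cuboid(GridSize, GridSize, GridSize).transl(".toList := by decide
  have h2 : ", Translate*".toList = ", ".toList ++ "Translate*".toList := by decide
  simp [pvItemA, pvTail, ← h1, h2]

theorem pvItemB_eq (c : Int) (xs ys : List Char) (i j : Int) :
    pvItemB c xs ys i j = "DefRegion(".toList ++ PySem.Int.toChars c ++ pvTail xs ys i j := by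
  simp [pvItemB, pvTail]

-- "Translate" = 'T' :: "ranslate", with the decompositions the replace lemmas need
theorem pv_replace_tail (i j : Int) :
    pvReplace1 "Translate".toList "-Translate".toList (pvTail [] [] i j) = pvTail "-".toList [] i j := by
  have hsplit : "Translate".toList = 'T' :: "ranslate".toList := by decide
  have hdecomp : pvTail [] [] i j
      = ", Cuboid(GridSize, GridSize, GridSize).transl(".toList ++ ('T' :: "ranslate".toList)
        ++ ("*".toList ++ PySem.Int.toChars (1 + 2 * i) ++ ", ".toList ++ "Translate*".toList
            ++ PySem.Int.toChars (1 + 2 * j) ++ ", 0))\n".toList) := by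
    simp [pvTail]
  have hres : pvTail "-".toList [] i j
      = ", Cuboid(GridSize, GridSize, GridSize).transl(".toList ++ "-Translate".toList
        ++ ("*".toList ++ PySem.Int.toChars (1 + 2 * i) ++ ", ".toList ++ "Translate*".toList
            ++ PySem.Int.toChars (1 + 2 * j) ++ ", 0))\n".toList) := by
    simp [pvTail]
  rw [hsplit, hdecomp, hres, pvReplace1_eq]
  decide

theorem pv_rsplit_tail (xs : List Char) (i j : Int) :
    PySem.Chars.join "-Translate".toList (pvRsplit1 (pvTail xs [] i j) "Translate".toList)
      = pvTail xs "-".toList i j := by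
  have hsplit : "Translate".toList = 'T' :: "ranslate".toList := by decide
  have hdecomp : pvTail xs [] i j
      = (", Cuboid(GridSize, GridSize, GridSize).transl(".toList ++ xs ++ "Translate*".toList
          ++ PySem.Int.toChars (1 + 2 * i) ++ ", ".toList) ++ ('T' :: "ranslate".toList)
        ++ ("*".toList ++ PySem.Int.toChars (1 + 2 * j) ++ ", 0))\n".toList) := by
    simp [pvTail]
  have hsuf : 'T' ∉ ("*".toList ++ PySem.Int.toChars (1 + 2 * j) ++ ", 0))\n".toList) := by
    intro h
    rcases List.mem_append.mp h with h1 | h1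
    · rcases List.mem_append.mp h1 with h2 | h2
      · exact absurd h2 (by decide)
      · exact pv_toChars_no_T _ h2
    · exact absurd h1 (by decide)
  unfold pvRsplit1
  rw [hsplit, hdecomp, pvSplitLast_eq _ _ _ (by decide) hsuf]
  rw [PySem.Chars.join_cons_cons, PySem.Chars.join_singleton]
  simp [pvTail]

-- block-level rewrites
theorem pv_map_replace_block (nx ny : Int) :
    (pvBlock [] [] nx ny).map (fun s => pvReplace1 "Translate".toList "-Translate".toList s)
      = pvBlock "-".toList [] nx ny := by
  unfold pvBlock
  rw [List.map_flatMap]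
  congr 1
  funext i
  rw [List.map_map]
  exact List.map_congr_left (fun j _ => pv_replace_tail i j)

theorem pv_map_rsplit_block (xs : List Char) (nx ny : Int) :
    (pvBlock xs [] nx ny).map (fun s => PySem.Chars.join "-Translate".toList (pvRsplit1 s "Translate".toList))
      = pvBlock xs "-".toList nx ny := by
  unfold pvBlock
  rw [List.map_flatMap]
  congr 1
  funext i
  rw [List.map_map]
  exact List.map_congr_left (fun j _ => pv_rsplit_tail xs i j)

-- numbering: enumerate+map (A) and the counter loop (B) both produce pvNumber
theorem pv_enumerate_number (l : List (List Char)) (s : Int) :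
    (PySem.List.enumerate l s).map (fun p => "DefRegion(".toList ++ PySem.Int.toChars (p.1 + 1) ++ p.2)
      = pvNumber (s + 1) l := by
  induction l generalizing s with
  | nil => simp [pvNumber, PySem.List.enumerate_nil]
  | cons a l ih =>
    rw [PySem.List.enumerate_cons, List.map_cons, ih, pvNumber]

theorem pvNumber_append (c : Int) (l₁ l₂ : List (List Char)) :
    pvNumber c (l₁ ++ l₂) = pvNumber c l₁ ++ pvNumber (c + l₁.length) l₂ := by
  induction l₁ generalizing c with
  | nil => simp [pvNumber]
  | cons a l ih => simp [pvNumber, ih]; ring_nf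

-- B's inner counter loop over one row
theorem pv_fold_row (h : List Int) (g : Int → List Char) (acc : List (List Char)) (c : Int) :
    h.foldl (fun st j => (st.1 ++ ["DefRegion(".toList ++ PySem.Int.toChars st.2 ++ g j], st.2 + 1)) (acc, c)
      = (acc ++ pvNumber c (h.map g), c + h.length) := by
  induction h generalizing acc c with
  | nil => simp [pvNumber]
  | cons a h ih =>
    rw [List.foldl_cons]
    show List.foldl _ (acc ++ ["DefRegion(".toList ++ PySem.Int.toChars c ++ g a], c + 1) h = _
    rw [ih, List.map_cons, pvNumber]
    refine Prod.ext ?_ ?_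
    · simp
    · simp; ring

-- B's counter loop over a whole block
theorem pv_fold_block (l : List Int) (G : Int → List (List Char)) (acc : List (List Char)) (c : Int) :
    l.foldl (fun st i => (st.1 ++ pvNumber st.2 (G i), st.2 + (G i).length)) (acc, c)
      = (acc ++ pvNumber c (l.flatMap G), c + (l.flatMap G).length) := by
  induction l generalizing acc c with
  | nil => simp [pvNumber]
  | cons a l ih =>
    rw [List.foldl_cons]
    show List.foldl _ (acc ++ pvNumber c (G a), c + (G a).length) l = _
    rw [ih, List.flatMap_cons, pvNumber_append]
    refine Prod.ext ?_ ?_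
    · simp
    · simp; ring

-- one sign-pair pass of B's outer loop
theorem pv_alt_pass (xs ys : List Char) (nx ny : Int) (acc : List (List Char)) (c : Int) :
    (PySem.List.pyRange 0 nx 1).foldl (fun st1 i =>
      (PySem.List.pyRange 0 ny 1).foldl (fun st2 j =>
        (st2.1 ++ [pvItemB st2.2 xs ys i j], st2.2 + 1)) st1) (acc, c)
      = (acc ++ pvNumber c (pvBlock xs ys nx ny), c + (pvBlock xs ys nx ny).length) := by
  have hrow : ∀ (i : Int) (acc' : List (List Char)) (c' : Int),
      (PySem.List.pyRange 0 ny 1).foldl (fun st2 j =>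
        (st2.1 ++ [pvItemB st2.2 xs ys i j], st2.2 + 1)) (acc', c')
      = (acc' ++ pvNumber c' ((PySem.List.pyRange 0 ny 1).map (fun j => pvTail xs ys i j)),
         c' + (PySem.List.pyRange 0 ny 1).length) := by
    intro i acc' c'
    have := pv_fold_row (PySem.List.pyRange 0 ny 1) (fun j => pvTail xs ys i j) acc' c'
    simp only [pvItemB_eq]
    simpa using this
  have key : (PySem.List.pyRange 0 nx 1).foldl (fun st1 i =>
      (PySem.List.pyRange 0 ny 1).foldl (fun st2 j =>
        (st2.1 ++ [pvItemB st2.2 xs ys i j], st2.2 + 1)) st1) (acc, c)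
      = (PySem.List.pyRange 0 nx 1).foldl (fun st1 i =>
          (st1.1 ++ pvNumber st1.2 ((PySem.List.pyRange 0 ny 1).map (fun j => pvTail xs ys i j)),
           st1.2 + ((PySem.List.pyRange 0 ny 1).map (fun j => pvTail xs ys i j)).length)) (acc, c) := by
    apply PySem.List.foldl_congr_mem
    intro st i _
    rcases st with ⟨a, b⟩
    simpa using hrow i a b
  rw [key]
  have := pv_fold_block (PySem.List.pyRange 0 nx 1)
    (fun i => (PySem.List.pyRange 0 ny 1).map (fun j => pvTail xs ys i j)) acc c
  simp only [List.length_map] at this ⊢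
  rw [this]
  rfl

-- A's result, in canonical form
theorem pvA_canonical (x y : Int) :
    generate_gridspace x y
      = String.ofList (PySem.Chars.join []
          (pvNumber 1 (pvBlock [] [] (PySem.Int.truncdiv x 2) (PySem.Int.truncdiv y 2)
            ++ pvBlock "-".toList [] (PySem.Int.truncdiv x 2) (PySem.Int.truncdiv y 2)
            ++ pvBlock [] "-".toList (PySem.Int.truncdiv x 2) (PySem.Int.truncdiv y 2)
            ++ pvBlock "-".toList "-".toList (PySem.Int.truncdiv x 2) (PySem.Int.truncdiv y 2)))) := by
  unfold generate_gridspace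
  have hg1 : (PySem.List.pyRange 0 (PySem.Int.truncdiv x 2) 1).foldl (fun acc i =>
      (PySem.List.pyRange 0 (PySem.Int.truncdiv y 2) 1).foldl (fun acc2 j =>
        acc2 ++ [pvItemA i j]) acc) ([] : List (List Char))
      = pvBlock [] [] (PySem.Int.truncdiv x 2) (PySem.Int.truncdiv y 2) := by
    simp only [PySem.List.foldl_append_singleton_eq_map]
    rw [PySem.List.foldl_append_eq_flatMap]
    unfold pvBlock
    rw [List.nil_append]
    congr 1
    funext i
    exact List.map_congr_left (fun j _ => pvItemA_eq i j)
  simp only [hg1, List.map_append, pv_map_replace_block, pv_map_rsplit_block]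
  rw [show (0 : Int) = -1 + 1 by ring, pv_enumerate_number]
  simp [List.append_assoc]

-- ===== VERDICT (by name: the statement is the Claim_ definition above) =====
theorem generate_gridspace_spec : Claim_equal_generate_gridspace := by
  intro x y _
  show generate_gridspace x y = generate_gridspace_alt x y
  rw [pvA_canonical]
  unfold generate_gridspace_alt
  simp only [List.foldl_cons, List.foldl_nil, pv_alt_pass]
  rw [pvNumber_append, pvNumber_append, pvNumber_append]
  simp [List.append_assoc]
  ring_nf
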